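-- pv_equiv track=rewrite | github.com/rongoro/ksp_parser | ksp_parser.py | _fill_underscores
-- ===== SOURCE A (Python) =====
-- def _fill_underscores(input_text, filler):
--     output = []
--     filler_index = 0
--     for char in input_text:
--         if char == '_':
--             output.append(filler[filler_index])
--             filler_index += 1
--         else:
--             output.append(char)
--     return ''.join(output)
-- ===== SOURCE B (Python) =====
-- def _fill_underscores(input_text, filler):
--     parts = input_text.split('_')
--     out = [parts[0]]
--     for i, part in enumerate(parts[1:]):
--         out.append(filler[i])
--         out.append(part)
--     return ''.join(out)
-- ===== Notes on version B (the rewrite author's own statement) =====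
-- stated objective: faster
-- what changed: B splits the input on '_' once and interleaves successive filler characters between the segments via str.split/join, instead of A's character-by-character scan appending each char to a list with a running filler index.
import Mathlib
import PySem

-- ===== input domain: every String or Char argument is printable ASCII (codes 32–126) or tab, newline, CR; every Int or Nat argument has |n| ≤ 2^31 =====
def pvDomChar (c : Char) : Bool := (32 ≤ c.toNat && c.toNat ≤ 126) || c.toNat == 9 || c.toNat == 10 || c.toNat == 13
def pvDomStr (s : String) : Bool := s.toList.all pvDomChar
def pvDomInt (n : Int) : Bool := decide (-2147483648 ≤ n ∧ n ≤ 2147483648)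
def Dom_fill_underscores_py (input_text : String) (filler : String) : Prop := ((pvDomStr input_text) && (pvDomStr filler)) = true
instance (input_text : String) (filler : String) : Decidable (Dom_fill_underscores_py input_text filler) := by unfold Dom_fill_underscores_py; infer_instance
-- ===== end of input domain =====

-- B replaces A's character-by-character scan with a split-on-'_' and interleave of
-- successive filler characters; equal output (and the same IndexError inputs, excluded by Pre_).

-- ===== PORT A =====
-- for-loop over the characters, state (output list, filler_index); Option threads the
-- IndexError of filler[filler_index] (none = Python raises there).
def fill_underscores_py (input_text : String) (filler : String) : String :=
  let st := input_text.toList.foldl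
    (fun (st : Option (List Char × Nat)) c =>
      match st with
      | none => none
      | some (output, fi) =>
        if c = '_' then
          match PySem.Chars.pyGet? filler.toList (fi : Int) with
          | some f => some (output ++ [f], fi + 1)
          | none => none
        else some (output ++ [c], fi))
    (some ([], 0))
  String.mk ((st.map Prod.fst).getD [])

-- ===== PORT B =====
-- parts = input_text.split('_'); out = [parts[0]]; for i, part in enumerate(parts[1:]):
-- out += [filler[i], part]; ''.join(out).  Option threads the IndexError of filler[i].
def fill_underscores_py_alt (input_text : String) (filler : String) : String :=
  let parts := PySem.Chars.splitOn input_text.toList ['_']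
  let res := ((parts.drop 1).zipIdx).foldl
    (fun (acc : Option (List Char)) (pi : List Char × Nat) =>
      match acc, PySem.Chars.pyGet? filler.toList (pi.2 : Int) with
      | some a, some c => some (a ++ c :: pi.1)
      | _, _ => none)
    (some (parts.headD []))
  String.mk (res.getD [])

-- ===== PRECONDITION & SPEC =====
-- Pre_ excludes exactly the inputs where Python raises IndexError (more underscores than filler characters).
def Pre_fill_underscores_py (input_text : String) (filler : String) : Prop :=
  input_text.toList.count '_' ≤ filler.toList.length
instance (input_text : String) (filler : String) : Decidable (Pre_fill_underscores_py input_text filler) := by unfold Pre_fill_underscores_py; infer_instance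
def pvWitness_fill_underscores_py : String × String := ("get_to_orbit", "12")

def Spec_fill_underscores_py (input_text : String) (filler : String) (out : String) : Prop := out = fill_underscores_py_alt input_text filler
instance (input_text : String) (filler : String) (out : String) : Decidable (Spec_fill_underscores_py input_text filler out) := by unfold Spec_fill_underscores_py; infer_instance

-- ===== CLAIM (what is proved, stated in full; the proofs are below) =====
def Claim_equal_fill_underscores_py : Prop := ∀ (input_text : String) (filler : String), Dom_fill_underscores_py input_text filler → Pre_fill_underscores_py input_text filler → Spec_fill_underscores_py input_text filler (fill_underscores_py input_text filler)

-- ===== LEMMAS AND PROOFS =====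

-- reference split on '_' (proved equal to PySem.Chars.splitOn · ['_'] below)
def pvSp : List Char → List (List Char)
  | [] => [[]]
  | c :: cs =>
    if c = '_' then [] :: pvSp cs
    else match pvSp cs with
      | [] => [[c]]
      | p :: ps => (c :: p) :: ps

lemma pvSp_ne_nil (cs : List Char) : pvSp cs ≠ [] := by
  cases cs with
  | nil => simp [pvSp]
  | cons c cs =>
    simp only [pvSp]
    split_ifs
    · simp
    · cases h : pvSp cs <;> simp

lemma pv_go_char (filler : List Char) (fuel : Nat) :
    ∀ (l cur : List Char) (acc : List (List Char)), l.length ≤ fuel →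
    PySem.Chars.splitOn.go ['_'] fuel l cur acc =
      acc.reverse ++ (match pvSp l with
        | [] => []
        | p :: ps => (cur.reverse ++ p) :: ps) := by
  induction fuel with
  | zero =>
    intro l cur acc h
    have : l = [] := by cases l <;> simp_all
    subst this
    simp [PySem.Chars.splitOn.go, pvSp]
  | succ fuel ih =>
    intro l cur acc h
    cases l with
    | nil => simp [PySem.Chars.splitOn.go, pvSp]
    | cons c rest =>
      rw [PySem.Chars.splitOn.go]
      by_cases hc : c = '_'
      · subst hc
        have hp : List.isPrefixOf ['_'] ('_' :: rest) = true := by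
          simp [List.isPrefixOf]
        simp only [hp, if_pos, List.length_cons, List.length_nil, List.drop_succ_cons,
          List.drop_zero]
        rw [ih rest [] (cur.reverse :: acc) (by simpa using Nat.le_of_succ_le_succ h)]
        cases hsp : pvSp rest with
        | nil => exact absurd hsp (pvSp_ne_nil rest)
        | cons p ps => simp [pvSp, hsp]
      · have hp : List.isPrefixOf ['_'] (c :: rest) = false := by
          simp only [List.isPrefixOf, Bool.and_eq_false_iff, beq_eq_false_iff_ne, ne_eq]
          exact Or.inl fun h' => hc h'.symm
        simp only [hp, Bool.false_eq_true, if_false]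
        rw [ih rest (c :: cur) acc (by simpa using Nat.le_of_succ_le_succ h)]
        cases hsp : pvSp rest with
        | nil => exact absurd hsp (pvSp_ne_nil rest)
        | cons p ps => simp [pvSp, hc, hsp]

lemma pv_splitOn_eq_sp (l : List Char) :
    PySem.Chars.splitOn l ['_'] = pvSp l := by
  rw [PySem.Chars.splitOn, pv_go_char ['_'] (l.length + 1) l [] [] (Nat.le_succ _)]
  cases hsp : pvSp l with
  | nil => exact absurd hsp (pvSp_ne_nil l)
  | cons p ps => simp

-- clean recursion computing A's output characters (none = IndexError)
def pvF (filler : List Char) : List Char → Nat → Option (List Char)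
  | [], _ => some []
  | c :: cs, i =>
    if c = '_' then
      (PySem.Chars.pyGet? filler (i : Int)).bind fun f =>
        (pvF filler cs (i + 1)).map (f :: ·)
    else (pvF filler cs i).map (c :: ·)

-- clean recursion computing B's interleaving over the tail parts
def pvG (filler : List Char) : List (List Char) → Nat → Option (List Char)
  | [], _ => some []
  | p :: ps, i =>
    (PySem.Chars.pyGet? filler (i : Int)).bind fun c =>
      (pvG filler ps (i + 1)).map (fun r => c :: p ++ r)

lemma pvA_foldl_none (filler : List Char) (cs : List Char) :
    cs.foldl
      (fun (st : Option (List Char × Nat)) c =>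
        match st with
        | none => none
        | some (output, fi) =>
          if c = '_' then
            match PySem.Chars.pyGet? filler (fi : Int) with
            | some f => some (output ++ [f], fi + 1)
            | none => none
          else some (output ++ [c], fi))
      none = none := by
  induction cs with
  | nil => rfl
  | cons d ds ihd => simpa using ihd

lemma pvB_foldl_none (filler : List Char) (l : List (List Char × Nat)) :
    l.foldl
      (fun (acc : Option (List Char)) (pi : List Char × Nat) =>
        match acc, PySem.Chars.pyGet? filler (pi.2 : Int) with
        | some a, some c => some (a ++ c :: pi.1)
        | _, _ => none)
      none = none := by
  induction l with
  | nil => rfl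
  | cons x xs ihx => simpa using ihx

-- A's foldl equals pvF (modulo the accumulated prefix and final index)
lemma pvA_foldl (filler : List Char) (cs : List Char) :
    ∀ (out : List Char) (i : Nat),
    cs.foldl
      (fun (st : Option (List Char × Nat)) c =>
        match st with
        | none => none
        | some (output, fi) =>
          if c = '_' then
            match PySem.Chars.pyGet? filler (fi : Int) with
            | some f => some (output ++ [f], fi + 1)
            | none => none
          else some (output ++ [c], fi))
      (some (out, i)) =
      (pvF filler cs i).map (fun r => (out ++ r, i + cs.count '_')) := by
  induction cs with
  | nil => intro out i; simp [pvF]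
  | cons c cs ih =>
    intro out i
    simp only [List.foldl_cons]
    by_cases hc : c = '_'
    · subst hc
      simp only [if_pos rfl]
      cases hg : PySem.Chars.pyGet? filler (i : Int) with
      | none =>
        simp only [hg, if_true]
        rw [pvA_foldl_none]
        simp only [pysem] at hg
        simp [pvF, hg]
      | some f =>
        simp only [hg, if_true]
        rw [ih (out ++ [f]) (i + 1)]
        simp only [pysem] at hg
        cases hF : pvF filler cs (i + 1) <;>
          simp [pvF, hg, hF, Option.map_map, Function.comp, List.count_cons] <;> omega
    · simp only [if_neg hc]
      rw [ih (out ++ [c]) i]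
      cases hF : pvF filler cs i <;>
        simp [pvF, hc, hF, Option.map_map, Function.comp, List.count_cons]

-- B's foldl over the indexed tail parts equals pvG (modulo the accumulated prefix)
lemma pvB_foldl (filler : List Char) (ps : List (List Char)) :
    ∀ (i : Nat) (a : List Char),
    (ps.zipIdx i).foldl
      (fun (acc : Option (List Char)) (pi : List Char × Nat) =>
        match acc, PySem.Chars.pyGet? filler (pi.2 : Int) with
        | some a, some c => some (a ++ c :: pi.1)
        | _, _ => none)
      (some a) =
      (pvG filler ps i).map (a ++ ·) := by
  induction ps with
  | nil => intro i a; simp [pvG]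
  | cons p ps ih =>
    intro i a
    simp only [List.zipIdx_cons, List.foldl_cons]
    cases hg : PySem.Chars.pyGet? filler (i : Int) with
    | none =>
      simp only [hg]
      rw [pvB_foldl_none]
      simp only [pysem] at hg
      simp [pvG, hg]
    | some c =>
      simp only [hg]
      rw [ih (i + 1) (a ++ c :: p)]
      simp only [pysem] at hg
      cases hG : pvG filler ps (i + 1) <;>
        simp [pvG, hg, hG, Option.map_map, Function.comp, List.append_assoc]

-- the bridge: A's character recursion equals B's interleaving over the split
lemma pvF_eq_sp (filler : List Char) (cs : List Char) : ∀ i : Nat,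
    pvF filler cs i =
      (match pvSp cs with
        | [] => none
        | p :: ps => (pvG filler ps i).map (p ++ ·)) := by
  induction cs with
  | nil => intro i; simp [pvF, pvSp, pvG]
  | cons c cs ih =>
    intro i
    by_cases hc : c = '_'
    · subst hc
      cases hsp : pvSp cs with
      | nil => exact absurd hsp (pvSp_ne_nil cs)
      | cons p ps =>
        simp only [pvF, if_pos rfl, pvSp, hsp]
        rw [ih (i + 1)]
        simp only [hsp]
        cases hg : PySem.Chars.pyGet? filler (i : Int) <;>
          simp only [pysem] at hg <;>
          cases hG : pvG filler ps (i + 1) <;> simp [pvG, hg, hG]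
    · cases hsp : pvSp cs with
      | nil => exact absurd hsp (pvSp_ne_nil cs)
      | cons p ps =>
        simp only [pvF, if_neg hc, pvSp, hsp]
        rw [ih i]
        simp only [hsp]
        cases hG : pvG filler ps i <;> simp [hG]

-- ===== VERDICT (by name: the statement is the Claim_ definition above) =====
theorem fill_underscores_py_spec : Claim_equal_fill_underscores_py := by
  intro input_text filler _ _
  unfold Spec_fill_underscores_py fill_underscores_py fill_underscores_py_alt
  rw [pvA_foldl filler.toList input_text.toList [] 0]
  rw [pv_splitOn_eq_sp input_text.toList]
  cases hsp : pvSp input_text.toList with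
  | nil => exact absurd hsp (pvSp_ne_nil _)
  | cons p ps =>
    dsimp only [List.drop_succ_cons, List.drop_zero, List.headD_cons]
    rw [pvB_foldl filler.toList ps 0 p]
    rw [pvF_eq_sp filler.toList input_text.toList 0, hsp]
    cases hG : pvG filler.toList ps 0 <;> simp [hG, Option.map_map, Function.comp]
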